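-- pv_equiv track=rewrite | github.com/andy-weng/106a-final-project | tello_node.py | modify_speed_based_on_obstacles
-- ===== SOURCE A (Python) =====
-- def modify_speed_based_on_obstacles(object_x, obstacles, fb_control, safety_margin=100):
--     """
--     Modify forward/backward speed based on proximity to obstacles.
--     """
--     if not obstacles:
--         return fb_control
--
--     closest_distance = float('inf')
--     for obs_x, _ in obstacles:
--         distance = abs(object_x - obs_x)
--         if distance < closest_distance:
--             closest_distance = distance
--
--     if closest_distance < safety_margin:
--         fb_control = max(1, fb_control // 2)
--
--     return fb_control
-- ===== SOURCE B (Python) =====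
-- def modify_speed_based_on_obstacles(object_x, obstacles, fb_control, safety_margin=100):
--     if any(abs(object_x - obs_x) < safety_margin for obs_x, _ in obstacles):
--         return max(1, fb_control // 2)
--     return fb_control
-- ===== Notes on version B (the rewrite author's own statement) =====
-- stated objective: simpler
-- what changed: Replaces the min-accumulating loop plus empty-list guard with a single short-circuiting any() existence test (min distance < margin iff some distance < margin; any() over empty is False).
import Mathlib
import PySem

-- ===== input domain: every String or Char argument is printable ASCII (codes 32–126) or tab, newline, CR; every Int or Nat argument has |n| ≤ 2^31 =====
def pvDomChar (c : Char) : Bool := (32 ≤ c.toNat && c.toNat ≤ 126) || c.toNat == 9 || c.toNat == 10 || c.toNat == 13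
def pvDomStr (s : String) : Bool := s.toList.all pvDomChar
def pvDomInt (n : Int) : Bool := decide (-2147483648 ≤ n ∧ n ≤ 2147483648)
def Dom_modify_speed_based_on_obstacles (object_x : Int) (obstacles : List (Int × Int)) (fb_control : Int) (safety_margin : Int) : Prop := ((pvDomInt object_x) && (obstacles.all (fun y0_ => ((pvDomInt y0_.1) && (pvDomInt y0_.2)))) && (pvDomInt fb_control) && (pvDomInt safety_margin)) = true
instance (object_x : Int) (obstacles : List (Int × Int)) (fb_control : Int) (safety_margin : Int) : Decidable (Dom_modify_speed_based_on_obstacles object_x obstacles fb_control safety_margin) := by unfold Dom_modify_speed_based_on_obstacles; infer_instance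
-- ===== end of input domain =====

-- B replaces A's min-accumulating loop and empty-list guard with a single short-circuiting existence test (simpler).
-- ===== PORT A =====
def pvClosestLoop (object_x : Int) : List (Int × Int) → Option Int → Option Int
  | [], c => c
  | (obs_x, _) :: rest, c =>
    let distance := |object_x - obs_x|
    let c' := match c with
      | none => some distance          -- float('inf') start: any distance beats it
      | some m => if distance < m then some distance else some m
    pvClosestLoop object_x rest c'

def modify_speed_based_on_obstacles (object_x : Int) (obstacles : List (Int × Int)) (fb_control : Int) (safety_margin : Int) : Int :=
  if obstacles = [] then fb_control
  else
    match pvClosestLoop object_x obstacles none with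
    | none => fb_control               -- unreachable: obstacles nonempty
    | some closest_distance =>
        if closest_distance < safety_margin then max 1 (PySem.Int.floordiv fb_control 2)
        else fb_control

-- ===== PORT B =====
def modify_speed_based_on_obstacles_alt (object_x : Int) (obstacles : List (Int × Int)) (fb_control : Int) (safety_margin : Int) : Int :=
  if obstacles.any (fun p => |object_x - p.1| < safety_margin) then max 1 (PySem.Int.floordiv fb_control 2)
  else fb_control

-- ===== PRECONDITION & SPEC =====
def Spec_modify_speed_based_on_obstacles (object_x : Int) (obstacles : List (Int × Int)) (fb_control : Int) (safety_margin : Int) (out : Int) : Prop := out = modify_speed_based_on_obstacles_alt object_x obstacles fb_control safety_margin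
instance (object_x : Int) (obstacles : List (Int × Int)) (fb_control : Int) (safety_margin : Int) (out : Int) : Decidable (Spec_modify_speed_based_on_obstacles object_x obstacles fb_control safety_margin out) := by unfold Spec_modify_speed_based_on_obstacles; infer_instance

-- ===== CLAIM (what is proved, stated in full; the proofs are below) =====
def Claim_equal_modify_speed_based_on_obstacles : Prop := ∀ (object_x : Int) (obstacles : List (Int × Int)) (fb_control : Int) (safety_margin : Int), Dom_modify_speed_based_on_obstacles object_x obstacles fb_control safety_margin → Spec_modify_speed_based_on_obstacles object_x obstacles fb_control safety_margin (modify_speed_based_on_obstacles object_x obstacles fb_control safety_margin)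

-- ===== LEMMAS AND PROOFS =====
def pvOptLt (o : Option Int) (s : Int) : Prop :=
  match o with
  | none => False
  | some m => m < s

-- the running minimum is below s iff the seed was or some obstacle distance is
theorem pvClosestLoop_lt (object_x s : Int) (obs : List (Int × Int)) (c : Option Int) :
    pvOptLt (pvClosestLoop object_x obs c) s ↔
      (pvOptLt c s ∨ obs.any (fun p => |object_x - p.1| < s) = true) := by
  induction obs generalizing c with
  | nil => simp [pvClosestLoop]
  | cons hd tl ih =>
    obtain ⟨obs_x, y⟩ := hd
    simp only [pvClosestLoop, List.any_cons, Bool.or_eq_true, decide_eq_true_eq]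
    rw [ih]
    cases c with
    | none =>
      simp only [pvOptLt]
      tauto
    | some m =>
      by_cases h : |object_x - obs_x| < m
      · simp only [if_pos h, pvOptLt]
        constructor
        · rintro (h1 | h2)
          · right; left; exact h1
          · right; right; exact h2
        · rintro (h1 | h2 | h3)
          · left; omega
          · left; exact h2
          · right; exact h3
      · simp only [if_neg h, pvOptLt]
        constructor
        · rintro (h1 | h2)
          · left; exact h1
          · right; right; exact h2
        · rintro (h1 | h2 | h3)
          · left; exact h1
          · left; omega
          · right; exact h3

theorem pvClosestLoop_isSome (object_x : Int) (obs : List (Int × Int)) (c : Option Int) :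
    obs ≠ [] ∨ c.isSome → (pvClosestLoop object_x obs c).isSome := by
  induction obs generalizing c with
  | nil => simp [pvClosestLoop]
  | cons hd tl ih =>
    intro _
    obtain ⟨obs_x, y⟩ := hd
    simp only [pvClosestLoop]
    apply ih
    right
    cases c with
    | none => rfl
    | some m => dsimp only; split <;> rfl

-- ===== VERDICT (by name: the statement is the Claim_ definition above) =====
theorem modify_speed_based_on_obstacles_spec : Claim_equal_modify_speed_based_on_obstacles := by
  intro object_x obstacles fb_control safety_margin _
  unfold Spec_modify_speed_based_on_obstacles modify_speed_based_on_obstacles modify_speed_based_on_obstacles_alt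
  by_cases he : obstacles = []
  · simp [he]
  · have hs := pvClosestLoop_isSome object_x obstacles none (Or.inl he)
    have hl := pvClosestLoop_lt object_x safety_margin obstacles none
    cases hres : pvClosestLoop object_x obstacles none with
    | none => rw [hres] at hs; simp at hs
    | some m =>
      rw [hres] at hl
      simp only [pvOptLt, false_or] at hl
      simp only [he, if_false]
      by_cases hm : m < safety_margin
      · rw [if_pos hm, if_pos (hl.mp hm)]
      · rw [if_neg hm, if_neg (fun h => hm (hl.mpr h))]
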